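-- pv_equiv track=rewrite | github.com/shanemarvinmay/interview-prep | questions/coding/leetcode_959/regions_cut_by_slashes.py | blow_up
-- ===== SOURCE A (Python) =====
-- def blow_up(grid):
--     # making matrix
--     m = []
--     for row in range(len(grid)*3):
--         new_row = []
--         for col in range(len(grid[0])*3):
--             new_row.append(1)
--         m.append(new_row)
--     # making dashes
--     for row in range(len(grid)):
--         for col in range(len(grid[0])):
--             _row, _col = row * 3, col * 3
--             if grid[row][col] == '\\':
--                 m[_row][_col] = 0
--                 m[_row+1][_col+1] = 0
--                 m[_row+2][_col+2] = 0
--             elif grid[row][col] == '/':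
--                 m[_row][_col+2] = 0
--                 m[_row+1][_col+1] = 0
--                 m[_row+2][_col] = 0
--     return m
-- ===== SOURCE B (Python) =====
-- def blow_up(grid):
--     if not grid:
--         return []
--     return [
--         [0 if ((grid[r // 3][c // 3] == '\\' and r % 3 == c % 3)
--                or (grid[r // 3][c // 3] == '/' and r % 3 + c % 3 == 2)) else 1
--          for c in range(len(grid[0]) * 3)]
--         for r in range(len(grid) * 3)]
-- ===== Notes on version B (the rewrite author's own statement) =====
-- stated objective: simpler
-- what changed: B replaces A's two-phase mutate-in-place construction (fill a matrix of 1s, then overwrite three cells per slash) with a single comprehension that computes each output cell directly from grid[r//3][c//3] and the in-block offsets r%3, c%3.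
import Mathlib
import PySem

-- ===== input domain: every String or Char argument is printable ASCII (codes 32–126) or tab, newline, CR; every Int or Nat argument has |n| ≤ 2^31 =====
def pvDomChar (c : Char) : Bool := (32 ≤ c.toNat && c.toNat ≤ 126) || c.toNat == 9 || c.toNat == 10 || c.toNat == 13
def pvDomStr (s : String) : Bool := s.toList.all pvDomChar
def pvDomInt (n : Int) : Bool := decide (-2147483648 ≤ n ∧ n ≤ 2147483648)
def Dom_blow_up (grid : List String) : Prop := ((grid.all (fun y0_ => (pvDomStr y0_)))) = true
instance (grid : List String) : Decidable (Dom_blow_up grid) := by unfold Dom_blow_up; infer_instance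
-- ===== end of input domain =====

-- B computes each cell of the blown-up grid by a direct formula instead of A's fill-then-overwrite mutation (simpler decomposition, same cost).


-- ===== PORT A =====
-- grid[row][col] (both ports read characters exactly this way; under Pre_ the indices are
-- always in range, so the ' ' default is never produced)
def chAt (grid : List String) (row col : Int) : Char :=
  ((PySem.List.pyGet? grid row).bind (fun s => PySem.Str.pyGet? s col)).getD ' '

-- m[i][j] = 0 ; the loops only call this with 0 ≤ i < len m and 0 ≤ j < len m[i], where
-- Python's nested-list assignment is exactly this update
def setCell (m : List (List Int)) (i j : Int) : List (List Int) :=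
  m.modify i.toNat (fun r => r.set j.toNat 0)

def blow_up (grid : List String) : List (List Int) :=
  let w : Int := PySem.Str.len (grid.headD "")
  -- making matrix
  let m := (PySem.List.pyRange 0 (grid.length * 3) 1).foldl
    (fun m _ =>
      m ++ [(PySem.List.pyRange 0 (w * 3) 1).foldl (fun nr _ => nr ++ [(1 : Int)]) []]) []
  -- making dashes
  (PySem.List.pyRange 0 grid.length 1).foldl
    (fun m row =>
      (PySem.List.pyRange 0 w 1).foldl
        (fun m col =>
          let r3 := row * 3
          let c3 := col * 3
          if chAt grid row col = '\\' then
            setCell (setCell (setCell m r3 c3) (r3 + 1) (c3 + 1)) (r3 + 2) (c3 + 2)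
          else if chAt grid row col = '/' then
            setCell (setCell (setCell m r3 (c3 + 2)) (r3 + 1) (c3 + 1)) (r3 + 2) c3
          else m) m) m

-- ===== PORT B =====
def blow_up_alt (grid : List String) : List (List Int) :=
  if grid = [] then []
  else
    (PySem.List.pyRange 0 (grid.length * 3) 1).map (fun r =>
      (PySem.List.pyRange 0 (PySem.Str.len (grid.headD "") * 3) 1).map (fun c =>
        let ch := chAt grid (PySem.Int.floordiv r 3) (PySem.Int.floordiv c 3)
        if (ch = '\\' ∧ PySem.Int.mod r 3 = PySem.Int.mod c 3) ∨
           (ch = '/' ∧ PySem.Int.mod r 3 + PySem.Int.mod c 3 = 2) then 0 else 1))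

-- ===== PRECONDITION & SPEC =====
-- Pre_ excludes exactly the ragged grids having a row shorter than the first row, on which
-- the Python A raises IndexError at grid[row][col] (the Python B raises there too).
def Pre_blow_up (grid : List String) : Prop :=
  ∀ s ∈ grid, PySem.Str.len (grid.headD "") ≤ PySem.Str.len s
instance (grid : List String) : Decidable (Pre_blow_up grid) := by unfold Pre_blow_up; infer_instance
def pvWitness_blow_up : List String := ["/\\", "\\/"]

def Spec_blow_up (grid : List String) (out : List (List Int)) : Prop := out = blow_up_alt grid
instance (grid : List String) (out : List (List Int)) : Decidable (Spec_blow_up grid out) := by unfold Spec_blow_up; infer_instance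

-- ===== CLAIM (what is proved, stated in full; the proofs are below) =====
def Claim_equal_blow_up : Prop := ∀ (grid : List String), Dom_blow_up grid → Pre_blow_up grid → Spec_blow_up grid (blow_up grid)

-- ===== LEMMAS AND PROOFS =====

-- the value of the output cell (i, j), in Nat coordinates
def tgt (grid : List String) (i j : Nat) : Int :=
  if (chAt grid ((i / 3 : Nat) : Int) ((j / 3 : Nat) : Int) = '\\' ∧ i % 3 = j % 3) ∨
     (chAt grid ((i / 3 : Nat) : Int) ((j / 3 : Nat) : Int) = '/' ∧ i % 3 + j % 3 = 2) then 0 else 1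

-- an N×W matrix given by a cell formula
def mk (N W : Nat) (f : Nat → Nat → Int) : List (List Int) :=
  (List.range N).map (fun i => (List.range W).map (fun j => f i j))

-- the port's inner loop body, named for the proofs
def innerB (grid : List String) (row : Int) (m : List (List Int)) (col : Int) : List (List Int) :=
  let r3 := row * 3
  let c3 := col * 3
  if chAt grid row col = '\\' then
    setCell (setCell (setCell m r3 c3) (r3 + 1) (c3 + 1)) (r3 + 2) (c3 + 2)
  else if chAt grid row col = '/' then
    setCell (setCell (setCell m r3 (c3 + 2)) (r3 + 1) (c3 + 1)) (r3 + 2) c3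
  else m

def outerB (grid : List String) (m : List (List Int)) (row : Int) : List (List Int) :=
  (PySem.List.pyRange 0 (PySem.Str.len (grid.headD "")) 1).foldl (innerB grid row) m

-- partial-progress cell value: rows before block r done, block row r done up to column block c
def g (grid : List String) (r c : Nat) (i j : Nat) : Int :=
  if i < 3 * r ∨ (i / 3 = r ∧ j < 3 * c) then tgt grid i j else 1

lemma mk_congr {N W : Nat} {f g : Nat → Nat → Int}
    (h : ∀ i < N, ∀ j < W, f i j = g i j) : mk N W f = mk N W g := by
  unfold mk
  refine List.map_congr_left (fun i hi => List.map_congr_left (fun j hj => ?_))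
  exact h i (List.mem_range.mp hi) j (List.mem_range.mp hj)

lemma setCell_mk (N W : Nat) (f : Nat → Nat → Int) (i j : Nat) :
    setCell (mk N W f) (i : Int) (j : Int)
      = mk N W (fun a b => if a = i ∧ b = j then 0 else f a b) := by
  unfold setCell mk
  simp only [Int.toNat_natCast]
  apply List.ext_getElem
  · simp
  · intro a h1 h2
    rw [List.getElem_modify]
    simp only [List.length_map, List.length_range] at h1 h2
    by_cases hia : i = a
    · subst hia
      rw [if_pos rfl]
      simp only [List.getElem_map, List.getElem_range]
      apply List.ext_getElem
      · simp
      · intro b hb1 hb2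
        simp only [List.getElem_set, List.getElem_map, List.getElem_range]
        by_cases hjb : j = b
        · subst hjb; simp
        · rw [if_neg hjb, if_neg (fun h => hjb h.2.symm)]
    · rw [if_neg hia]
      simp only [List.getElem_map, List.getElem_range]
      refine List.map_congr_left (fun b _ => ?_)
      rw [if_neg (by tauto)]

lemma blow_up_def (grid : List String) :
    blow_up grid = (PySem.List.pyRange 0 (grid.length : Int) 1).foldl (outerB grid)
      ((PySem.List.pyRange 0 ((grid.length : Int) * 3) 1).foldl
        (fun m _ => m ++ [(PySem.List.pyRange 0 (PySem.Str.len (grid.headD "") * 3) 1).foldl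
          (fun nr _ => nr ++ [(1 : Int)]) []]) []) := rfl

lemma inner_step (grid : List String) (N W : Nat) (r c : Nat) :
    innerB grid (r : Int) (mk N W (g grid r c)) (c : Int) = mk N W (g grid r (c + 1)) := by
  unfold innerB
  have e1 : ((r : Int) * 3) = ((3 * r : Nat) : Int) := by push_cast; ring
  have e2 : ((r : Int) * 3 + 1) = ((3 * r + 1 : Nat) : Int) := by push_cast; ring
  have e3 : ((r : Int) * 3 + 2) = ((3 * r + 2 : Nat) : Int) := by push_cast; ring
  have f1 : ((c : Int) * 3) = ((3 * c : Nat) : Int) := by push_cast; ring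
  have f2 : ((c : Int) * 3 + 1) = ((3 * c + 1 : Nat) : Int) := by push_cast; ring
  have f3 : ((c : Int) * 3 + 2) = ((3 * c + 2 : Nat) : Int) := by push_cast; ring
  by_cases h1 : chAt grid (r : Int) (c : Int) = '\\'
  · rw [if_pos h1, e2, e3, e1, f2, f3, f1, setCell_mk, setCell_mk, setCell_mk]
    apply mk_congr
    intro i hi j hj
    by_cases hb : i / 3 = r ∧ j / 3 = c
    · have ht : tgt grid i j = if i % 3 = j % 3 then 0 else 1 := by
        unfold tgt; rw [hb.1, hb.2, h1]; simp
      unfold g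
      rw [ht]
      split_ifs <;> omega
    · unfold g
      split_ifs <;> first | rfl | omega
  · by_cases h2 : chAt grid (r : Int) (c : Int) = '/'
    · rw [if_neg h1, if_pos h2, e2, e3, e1, f3, f2, f1, setCell_mk, setCell_mk, setCell_mk]
      apply mk_congr
      intro i hi j hj
      by_cases hb : i / 3 = r ∧ j / 3 = c
      · have ht : tgt grid i j = if i % 3 + j % 3 = 2 then 0 else 1 := by
          unfold tgt; rw [hb.1, hb.2, h2]; simp
        unfold g
        rw [ht]
        split_ifs <;> omega
      · unfold g
        split_ifs <;> first | rfl | omega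
    · rw [if_neg h1, if_neg h2]
      apply mk_congr
      intro i hi j hj
      by_cases hb : i / 3 = r ∧ j / 3 = c
      · have ht : tgt grid i j = 1 := by
          unfold tgt; rw [hb.1, hb.2]; rw [if_neg]; rintro (⟨h, _⟩ | ⟨h, _⟩)
          · exact h1 h
          · exact h2 h
        unfold g
        rw [ht]
        split_ifs <;> omega
      · unfold g
        split_ifs <;> first | rfl | omega

lemma inner_loop (grid : List String) (N W : Nat) (r : Nat) : ∀ (c : Nat),
    (PySem.List.pyRange 0 (c : Int) 1).foldl (innerB grid (r : Int)) (mk N W (g grid r 0))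
      = mk N W (g grid r c) := by
  intro c
  induction c with
  | zero => simp [PySem.List.pyRange_one_eq_nil]
  | succ c ih =>
    have hc : ((c + 1 : Nat) : Int) = (c : Int) + 1 := by push_cast; ring
    rw [hc, PySem.List.pyRange_one_succ_right (by positivity), List.foldl_append, ih]
    simp only [List.foldl_cons, List.foldl_nil]
    exact inner_step grid N W r c

lemma outer_loop (grid : List String) (N W' : Nat)
    (hw : PySem.Str.len (grid.headD "") = (W' : Int)) : ∀ (k : Nat),
    (PySem.List.pyRange 0 (k : Int) 1).foldl (outerB grid) (mk N (3 * W') (fun _ _ => 1))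
      = mk N (3 * W') (fun i j => if i < 3 * k then tgt grid i j else 1) := by
  intro k
  induction k with
  | zero =>
    simp only [PySem.List.pyRange_one_eq_nil (le_refl 0), List.foldl_nil, Nat.cast_zero]
    exact mk_congr (by intro i hi j hj; rw [if_neg (by omega)])
  | succ k ih =>
    have hk : ((k + 1 : Nat) : Int) = (k : Int) + 1 := by push_cast; ring
    rw [hk, PySem.List.pyRange_one_succ_right (by positivity), List.foldl_append, ih]
    simp only [List.foldl_cons, List.foldl_nil]
    unfold outerB
    rw [hw]
    have hstart : mk N (3 * W') (fun i j => if i < 3 * k then tgt grid i j else 1)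
        = mk N (3 * W') (g grid k 0) := by
      apply mk_congr; intro i hi j hj; unfold g; exact if_congr (by omega) rfl rfl
    rw [hstart, inner_loop grid N (3 * W') k W']
    apply mk_congr; intro i hi j hj; unfold g; exact if_congr (by omega) rfl rfl

lemma blow_up_eq (grid : List String) :
    blow_up grid
      = mk (3 * grid.length) (3 * (grid.headD "").toList.length) (tgt grid) := by
  rw [blow_up_def]
  have hw : PySem.Str.len (grid.headD "") = (((grid.headD "").toList.length : Nat) : Int) :=
    PySem.Str.len_eq _
  have h1 : ((grid.length : Int) * 3) = ((3 * grid.length : Nat) : Int) := by push_cast; ring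
  have h2 : (PySem.Str.len (grid.headD "") * 3)
      = ((3 * (grid.headD "").toList.length : Nat) : Int) := by rw [hw]; push_cast; ring
  have hm0 : (PySem.List.pyRange 0 ((grid.length : Int) * 3) 1).foldl
      (fun m _ => m ++ [(PySem.List.pyRange 0 (PySem.Str.len (grid.headD "") * 3) 1).foldl
        (fun nr _ => nr ++ [(1 : Int)]) []]) []
      = mk (3 * grid.length) (3 * (grid.headD "").toList.length) (fun _ _ => 1) := by
    simp only [PySem.List.foldl_append_singleton_eq_map, List.nil_append, h1, h2,
      PySem.List.pyRange_zero_natCast, List.map_map]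
    unfold mk
    rfl
  rw [hm0, outer_loop grid _ _ hw grid.length]
  apply mk_congr; intro i hi j hj; rw [if_pos hi]

lemma blow_up_alt_eq (grid : List String) :
    blow_up_alt grid
      = mk (3 * grid.length) (3 * (grid.headD "").toList.length) (tgt grid) := by
  unfold blow_up_alt
  by_cases hg : grid = []
  · subst hg; simp [mk]
  · rw [if_neg hg]
    have h1 : ((grid.length : Int) * 3) = ((3 * grid.length : Nat) : Int) := by push_cast; ring
    have h2 : (PySem.Str.len (grid.headD "") * 3)
        = ((3 * (grid.headD "").toList.length : Nat) : Int) := by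
      rw [PySem.Str.len_eq]; push_cast; ring
    rw [h1, h2, PySem.List.pyRange_zero_natCast, PySem.List.pyRange_zero_natCast,
        List.map_map]
    unfold mk
    refine List.map_congr_left (fun i hi => ?_)
    simp only [Function.comp]
    rw [List.map_map]
    refine List.map_congr_left (fun j hj => ?_)
    simp only [Function.comp]
    have hd : PySem.Int.floordiv ((i : Nat) : Int) 3 = ((i / 3 : Nat) : Int) := by
      rw [PySem.Int.floordiv_eq_ediv_of_pos (by norm_num)]; omega
    have hd2 : PySem.Int.floordiv ((j : Nat) : Int) 3 = ((j / 3 : Nat) : Int) := by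
      rw [PySem.Int.floordiv_eq_ediv_of_pos (by norm_num)]; omega
    have hm : PySem.Int.mod ((i : Nat) : Int) 3 = ((i % 3 : Nat) : Int) := by
      rw [PySem.Int.mod_eq_emod_of_pos (by norm_num)]; omega
    have hm2 : PySem.Int.mod ((j : Nat) : Int) 3 = ((j % 3 : Nat) : Int) := by
      rw [PySem.Int.mod_eq_emod_of_pos (by norm_num)]; omega
    rw [hd, hd2, hm, hm2]
    unfold tgt
    refine if_congr ?_ rfl rfl
    constructor
    · rintro (⟨h, h'⟩ | ⟨h, h'⟩)
      · exact Or.inl ⟨h, by exact_mod_cast h'⟩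
      · exact Or.inr ⟨h, by exact_mod_cast h'⟩
    · rintro (⟨h, h'⟩ | ⟨h, h'⟩)
      · exact Or.inl ⟨h, by exact_mod_cast h'⟩
      · exact Or.inr ⟨h, by exact_mod_cast h'⟩

-- ===== VERDICT (by name: the statement is the Claim_ definition above) =====
theorem blow_up_spec : Claim_equal_blow_up := by
  intro grid _ _
  unfold Spec_blow_up
  rw [blow_up_eq, blow_up_alt_eq]
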